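-- pv_equiv track=rewrite | github.com/heedongwang/Algorithm | 프로그래머스/1/12954. x만큼 간격이 있는 n개의 숫자/x만큼 간격이 있는 n개의 숫자.py | solution
-- ===== SOURCE A (Python) =====
-- def solution(x, n):
--     answer = []
--     start=x
--     end=(x*n)
--     if x==0:
--         answer=[0]*n
--     elif x>0:
--         for i in range(start,end+1,x):
--             answer.append(i)
--     elif x<0:
--         for i in range(start,end-1,x):
--             answer.append(i)
--
--     return answer
-- ===== SOURCE B (Python) =====
-- def solution(x, n):
--     return [x * i for i in range(1, n + 1)]
-- ===== Notes on version B (the rewrite author's own statement) =====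
-- stated objective: simpler
-- what changed: Replaces A's x==0/x>0/x<0 branch cascade with additive stepped ranges and append-accumulation by a single index-driven comprehension computing each term as x*i.
import Mathlib
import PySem

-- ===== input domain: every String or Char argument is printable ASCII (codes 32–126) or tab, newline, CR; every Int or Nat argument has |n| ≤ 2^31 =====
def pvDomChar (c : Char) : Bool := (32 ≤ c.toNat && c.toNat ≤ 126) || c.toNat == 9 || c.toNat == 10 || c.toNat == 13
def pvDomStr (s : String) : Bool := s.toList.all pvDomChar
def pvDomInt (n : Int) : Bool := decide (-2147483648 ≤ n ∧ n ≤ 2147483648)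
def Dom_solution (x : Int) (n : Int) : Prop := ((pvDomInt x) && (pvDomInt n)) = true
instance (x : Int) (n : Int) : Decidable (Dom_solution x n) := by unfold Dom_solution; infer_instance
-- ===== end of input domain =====

-- B replaces A's x==0/x>0/x<0 branch cascade and additive stepped ranges by one
-- index-driven pass computing each term as x*i; equivalence proved on the whole domain.


-- ===== PORT A =====
-- [0]*n with negative n is [] in Python; n.toNat gives exactly that.
def solution (x : Int) (n : Int) : List Int :=
  let answer : List Int := []
  let start := x
  let stop := x * n
  if x = 0 then List.replicate n.toNat 0
  else if x > 0 then (PySem.List.pyRange start (stop + 1) x).foldl (fun a i => a ++ [i]) answer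
  else if x < 0 then (PySem.List.pyRange start (stop - 1) x).foldl (fun a i => a ++ [i]) answer
  else answer

-- ===== PORT B =====
def solution_alt (x : Int) (n : Int) : List Int :=
  (PySem.List.pyRange 1 (n + 1) 1).map (fun i => x * i)

-- ===== PRECONDITION & SPEC =====
def Spec_solution (x : Int) (n : Int) (out : List Int) : Prop := out = solution_alt x n
instance (x : Int) (n : Int) (out : List Int) : Decidable (Spec_solution x n out) := by unfold Spec_solution; infer_instance

-- ===== CLAIM (what is proved, stated in full; the proofs are below) =====
def Claim_equal_solution : Prop := ∀ (x : Int) (n : Int), Dom_solution x n → Spec_solution x n (solution x n)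

-- ===== LEMMAS AND PROOFS =====

-- B rewritten as a map over List.range of length n.toNat (n+1-1 = n).
lemma alt_eq_range (x n : Int) :
    solution_alt x n = (List.range n.toNat).map (fun k : Nat => x + x * (k : Int)) := by
  unfold solution_alt
  rw [PySem.List.pyRange_one]
  simp only [add_sub_cancel_right, List.map_map]
  exact List.map_congr_left (fun k _ => by simp [Function.comp]; ring)

-- ===== VERDICT (by name: the statement is the Claim_ definition above) =====
theorem solution_spec : Claim_equal_solution := by
  intro x n _
  unfold Spec_solution solution
  rw [alt_eq_range]
  rcases lt_trichotomy x 0 with hx | hx | hx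
  · rw [if_neg (by omega), if_neg (by omega), if_pos hx,
      PySem.List.foldl_append_singleton, List.nil_append]
    unfold PySem.List.pyRange
    rw [if_neg (by omega), if_neg (by omega)]
    by_cases hn : 1 ≤ n
    · rw [if_pos (by nlinarith)]
      have hnum : x - (x * n - 1) + -x - 1 = -x * n := by ring
      rw [hnum, Int.mul_ediv_cancel_left n (by omega)]
    · rw [if_neg (by nlinarith), Int.toNat_of_nonpos (by omega)]
  · subst hx; rw [if_pos rfl]
    simp [List.map_const']
  · rw [if_neg (by omega), if_pos hx,
      PySem.List.foldl_append_singleton, List.nil_append]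
    unfold PySem.List.pyRange
    rw [if_neg (by omega), if_pos hx]
    by_cases hn : 1 ≤ n
    · rw [if_pos (by nlinarith)]
      have hnum : x * n + 1 - x + x - 1 = x * n := by ring
      rw [hnum, Int.mul_ediv_cancel_left n (by omega)]
    · rw [if_neg (by nlinarith), Int.toNat_of_nonpos (by omega)]
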